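-- pv_equiv track=rewrite | github.com/PostHog/posthog-foss | products/conversations/backend/ai/suggest.py | _format_person_context
-- ===== SOURCE A (Python) =====
-- PERSON_PROPERTY_ALLOWLIST = frozenset(
--     {
--         "$geoip_country_name",
--         "$geoip_city_name",
--         "$geoip_time_zone",
--         "$browser",
--         "$os",
--         "$initial_referrer",
--         "$initial_referring_domain",
--     }
-- )
--
-- PRIORITY_PERSON_PROPERTIES = (
--     "email",
--     "name",
--     "first_name",
--     "last_name",
--     "plan",
--     "company",
--     "organization",
-- )
--
-- MAX_PERSON_PROPERTIES = 30
--
-- def _format_person_context(properties: dict) -> str: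
--     if not properties:
--         return ""
--
--     def _is_usable(key: str, value: object) -> bool:
--         if value is None or value == "":
--             return False
--         if key.startswith("$") and key not in PERSON_PROPERTY_ALLOWLIST:
--             return False
--         return True
--
--     filtered: dict[str, str] = {}
--
--     for key in PRIORITY_PERSON_PROPERTIES:
--         if key in properties and _is_usable(key, properties[key]):
--             filtered[key] = str(properties[key])
--
--     for key, value in properties.items():
--         if len(filtered) >= MAX_PERSON_PROPERTIES:
--             break
--         if key in filtered:
--             continue
--         if not _is_usable(key, value):
--             continue
--         filtered[key] = str(value)
--
--     if not filtered:
--         return ""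
--
--     lines = [f"- {key}: {value}" for key, value in filtered.items()]
--     return "\n".join(lines)
-- ===== SOURCE B (Python) =====
-- PERSON_PROPERTY_ALLOWLIST = frozenset(
--     {
--         "$geoip_country_name",
--         "$geoip_city_name",
--         "$geoip_time_zone",
--         "$browser",
--         "$os",
--         "$initial_referrer",
--         "$initial_referring_domain",
--     }
-- )
--
-- PRIORITY_PERSON_PROPERTIES = (
--     "email",
--     "name",
--     "first_name",
--     "last_name",
--     "plan",
--     "company",
--     "organization",
-- )
--
-- MAX_PERSON_PROPERTIES = 30
--
--
-- def _format_person_context(properties: dict) -> str: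
--     rank = {key: index for index, key in enumerate(PRIORITY_PERSON_PROPERTIES)}
--     default_rank = len(PRIORITY_PERSON_PROPERTIES)
--     usable = [
--         (key, str(value))
--         for key, value in properties.items()
--         if value is not None
--         and value != ""
--         and (not key.startswith("$") or key in PERSON_PROPERTY_ALLOWLIST)
--     ]
--     usable.sort(key=lambda item: rank.get(item[0], default_rank))
--     return "\n".join(f"- {key}: {value}" for key, value in usable[:MAX_PERSON_PROPERTIES])
-- ===== Notes on version B (the rewrite author's own statement) =====
-- stated objective: idiomatic
-- what changed: Replaces A's two sequential dict-building passes (priority pass, then an insertion-order fill with a break at the cap) by one filter pass, a stable sort keyed by a rank dict built from enumerate(PRIORITY_PERSON_PROPERTIES), a [:MAX_PERSON_PROPERTIES] slice and one join.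
import Mathlib
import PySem

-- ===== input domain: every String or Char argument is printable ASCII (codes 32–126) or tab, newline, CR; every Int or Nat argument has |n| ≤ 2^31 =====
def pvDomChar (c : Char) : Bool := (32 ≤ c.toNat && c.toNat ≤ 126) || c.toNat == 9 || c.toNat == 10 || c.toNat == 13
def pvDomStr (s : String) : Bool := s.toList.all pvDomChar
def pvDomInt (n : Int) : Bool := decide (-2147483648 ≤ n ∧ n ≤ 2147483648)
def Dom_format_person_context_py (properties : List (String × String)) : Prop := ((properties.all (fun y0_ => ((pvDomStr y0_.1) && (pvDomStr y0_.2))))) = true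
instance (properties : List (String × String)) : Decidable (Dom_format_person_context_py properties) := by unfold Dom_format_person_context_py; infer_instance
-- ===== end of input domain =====

-- B replaces A's two sequential dict-building passes by one filter pass, a stable sort keyed by a
-- rank dict, a slice and a join (objective: idiomatic; not claimed faster).
-- Values are strings here, so Python's `str(value)` is the identity and `value is None` is always false.

-- module constant PERSON_PROPERTY_ALLOWLIST (a frozenset)
def pvAllow : PySem.Set String :=
  PySem.Set.ofList ["$geoip_country_name", "$geoip_city_name", "$geoip_time_zone", "$browser",
                    "$os", "$initial_referrer", "$initial_referring_domain"]

-- module constant PRIORITY_PERSON_PROPERTIES (a tuple); MAX_PERSON_PROPERTIES = 30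
def pvPriority : List String :=
  ["email", "name", "first_name", "last_name", "plan", "company", "organization"]

-- ===== PORT A =====
-- the inner helper `_is_usable` of A
def pvIsUsableA (key : String) (value : String) : Bool :=
  if value == "" then false
  else if PySem.Str.startswith key "$" && !(PySem.Set.contains pvAllow key) then false
  else true

-- first loop of A: `for key in PRIORITY_PERSON_PROPERTIES: …`
def pvPass1 (props : PySem.Dict String String) : PySem.Dict String String :=
  pvPriority.foldl
    (fun d key =>
      if props.contains key then
        (if pvIsUsableA key (props.getD key "") then d.insert key (props.getD key "") else d)
      else d)
    PySem.Dict.empty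

-- second loop of A: `for key, value in properties.items(): …` with the `break` at MAX_PERSON_PROPERTIES
def pvPass2 : List (String × String) → PySem.Dict String String → PySem.Dict String String
  | [], d => d
  | (key, value) :: rest, d =>
    if 30 ≤ d.size then d
    else if d.contains key then pvPass2 rest d
    else if !(pvIsUsableA key value) then pvPass2 rest d
    else pvPass2 rest (d.insert key value)

def format_person_context_py (properties : List (String × String)) : String :=
  if properties = [] then ""
  else
    let filtered := pvPass2 properties (pvPass1 (PySem.Dict.mk properties))
    if filtered.items = [] then ""
    else PySem.Str.join "\n" (filtered.items.map (fun p => "- " ++ p.1 ++ ": " ++ p.2))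

-- ===== PORT B =====
-- rank = {key: index for index, key in enumerate(PRIORITY_PERSON_PROPERTIES)}
def pvRankDict : PySem.Dict String Int :=
  (PySem.List.enumerate pvPriority).foldl (fun d p => d.insert p.2 p.1) PySem.Dict.empty

-- the comprehension's filter condition in B
def pvIsUsableB (key : String) (value : String) : Bool :=
  !(value == "") && (!(PySem.Str.startswith key "$") || PySem.Set.contains pvAllow key)

def format_person_context_py_alt (properties : List (String × String)) : String :=
  let defaultRank : Int := PySem.List.len pvPriority
  let usable := properties.filter (fun p => pvIsUsableB p.1 p.2)
  let sortedUsable := PySem.List.sorted usable (fun p => pvRankDict.getD p.1 defaultRank) false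
  PySem.Str.join "\n"
    ((PySem.List.slice sortedUsable none (some 30)).map (fun p => "- " ++ p.1 ++ ": " ++ p.2))

-- ===== PRECONDITION & SPEC =====
-- Pre_ excludes lists with duplicate keys: they do not arise from a Python dict (dict construction
-- collapses duplicates), so the association-list ports' behaviour there is a representation artefact.
def Pre_format_person_context_py (properties : List (String × String)) : Prop :=
  (properties.map Prod.fst).Nodup
instance (properties : List (String × String)) : Decidable (Pre_format_person_context_py properties) := by
  unfold Pre_format_person_context_py; infer_instance

def pvWitness_format_person_context_py : (List (String × String)) :=
  [("email", "alice@x.com"), ("$os", "Mac OS X"), ("zebra", "1")]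

def Spec_format_person_context_py (properties : List (String × String)) (out : String) : Prop := out = format_person_context_py_alt properties
instance (properties : List (String × String)) (out : String) : Decidable (Spec_format_person_context_py properties out) := by unfold Spec_format_person_context_py; infer_instance

-- ===== CLAIM (what is proved, stated in full; the proofs are below) =====
def Claim_equal_format_person_context_py : Prop := ∀ (properties : List (String × String)), Dom_format_person_context_py properties → Pre_format_person_context_py properties → Spec_format_person_context_py properties (format_person_context_py properties)

-- ===== LEMMAS AND PROOFS =====

theorem pv_usableAB (k v : String) : pvIsUsableB k v = pvIsUsableA k v := by
  unfold pvIsUsableA pvIsUsableB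
  cases hv : v == "" <;> cases hs : PySem.Str.startswith k "$" <;>
    cases hc : PySem.Set.contains pvAllow k <;> simp

-- the key function used by B, as a function of the key string alone
def pvRankOf (k : String) : Int := pvRankDict.getD k (PySem.List.len pvPriority)

theorem pv_rank_getD (k : String) :
    pvRankOf k = if "email" = k then 0 else if "name" = k then 1 else if "first_name" = k then 2
      else if "last_name" = k then 3 else if "plan" = k then 4 else if "company" = k then 5
      else if "organization" = k then 6 else 7 := by
  have h : pvRankDict = PySem.Dict.mk [("email",(0:Int)),("name",1),("first_name",2),("last_name",3),("plan",4),("company",5),("organization",6)] := by decide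
  unfold pvRankOf
  rw [h]; clear h
  simp only [PySem.Dict.getD_eq_get?_getD, PySem.Dict.get?_mk_cons, beq_iff_eq]
  split_ifs <;> rfl

theorem pv_rank_le (k : String) : pvRankOf k ≤ 7 := by
  rw [pv_rank_getD]; split_ifs <;> norm_num

theorem pv_rank_lt_iff (k : String) : pvRankOf k < 7 ↔ k ∈ pvPriority := by
  rw [pv_rank_getD]
  split_ifs with h1 h2 h3 h4 h5 h6 h7 <;> simp_all [pvPriority, eq_comm]

-- selection function of A's first pass
def pvGsel (props : PySem.Dict String String) (k : String) : Option String :=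
  (props.get? k).bind (fun v => if pvIsUsableA k v then some v else none)

theorem pv_items_foldl_optInsert (ks : List String) (f : String → Option String)
    (d : PySem.Dict String String) (hn : ks.Nodup) (hf : ∀ k ∈ ks, d.contains k = false) :
    (ks.foldl (fun d k => match f k with | some v => d.insert k v | none => d) d).items
      = d.items ++ ks.filterMap (fun k => (f k).map (fun v => (k, v))) := by
  induction ks generalizing d with
  | nil => simp
  | cons k ks ih =>
    simp only [List.foldl_cons, List.filterMap_cons]
    cases hfk : f k with
    | none =>
      simp only [Option.map_none]
      exact ih d hn.of_cons (fun k' hk' => hf k' (List.mem_cons_of_mem _ hk'))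
    | some v =>
      simp only [Option.map_some]
      have hck : d.contains k = false := hf k (List.mem_cons_self)
      have hitems := PySem.Dict.items_insert_of_not_contains d v hck
      rw [ih (d.insert k v) hn.of_cons ?_, hitems]
      · simp
      · intro k' hk'
        rw [PySem.Dict.contains_insert]
        have : k' ≠ k := by
          rintro rfl; exact (List.nodup_cons.mp hn).1 hk'
        simp [this, hf k' (List.mem_cons_of_mem _ hk')]

theorem pv_pass1_items (props : PySem.Dict String String) :
    (pvPass1 props).items = pvPriority.filterMap (fun k => (pvGsel props k).map (fun v => (k, v))) := by
  have hbody : ∀ (d : PySem.Dict String String) (k : String),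
      (if props.contains k then
        (if pvIsUsableA k (props.getD k "") then d.insert k (props.getD k "") else d)
      else d)
      = (match pvGsel props k with | some v => d.insert k v | none => d) := by
    intro d k
    cases hg : props.get? k with
    | none =>
      have hc : props.contains k = false := by
        rw [PySem.Dict.contains_eq_isSome_get?, hg]; rfl
      simp [pvGsel, hg, hc]
    | some v =>
      have hc : props.contains k = true := by
        rw [PySem.Dict.contains_eq_isSome_get?, hg]; rfl
      have hgd : props.getD k "" = v := PySem.Dict.getD_of_get?_eq_some props "" hg
      by_cases hu : pvIsUsableA k v = true
      · simp [pvGsel, hg, hc, hgd, hu]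
      · simp only [Bool.not_eq_true] at hu
        simp [pvGsel, hg, hc, hgd, hu]
  unfold pvPass1
  rw [PySem.List.foldl_congr_mem pvPriority _ (fun d k => (match pvGsel props k with | some v => d.insert k v | none => d)) PySem.Dict.empty (fun acc x _ => hbody acc x)]
  rw [pv_items_foldl_optInsert _ _ _ (by decide) (by intro k _; rfl)]
  rfl

theorem pv_keys_filterMap (ks : List String) (f : String → Option String) :
    (ks.filterMap (fun k => (f k).map (fun v => (k, v)))).map Prod.fst
      = ks.filter (fun k => (f k).isSome) := by
  induction ks with
  | nil => rfl
  | cons k ks ih =>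
    cases hfk : f k <;> simp [hfk, ih]

theorem pv_pass2_items (rest : List (String × String)) (d : PySem.Dict String String)
    (hkn : (rest.map Prod.fst).Nodup)
    (hc : ∀ p ∈ rest, pvIsUsableA p.1 p.2 = true → d.contains p.1 = decide (p.1 ∈ pvPriority))
    (hdn : d.keys.Nodup) :
    (pvPass2 rest d).items
      = d.items ++ (rest.filter (fun p => pvIsUsableA p.1 p.2 && !(decide (p.1 ∈ pvPriority)))).take (30 - d.size) := by
  induction rest generalizing d with
  | nil => simp [pvPass2]
  | cons p rest ih =>
    obtain ⟨k, v⟩ := p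
    by_cases h30 : 30 ≤ d.size
    · have : 30 - d.size = 0 := by omega
      simp [pvPass2, h30, this]
    · simp only [pvPass2, if_neg h30]
      by_cases hck : d.contains k = true
      · rw [if_pos hck]
        have hdrop : (pvIsUsableA k v && !(decide (k ∈ pvPriority))) = false := by
          by_cases hu : pvIsUsableA k v = true
          · have hd := hc (k, v) (List.mem_cons_self) hu
            have hkp : decide (k ∈ pvPriority) = true := hd.symm.trans hck
            simp [hu, hkp]
          · simp only [Bool.not_eq_true] at hu
            simp [hu]
        rw [ih d hkn.of_cons (fun q hq hu => hc q (List.mem_cons_of_mem _ hq) hu) hdn]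
        simp [hdrop]
      · simp only [Bool.not_eq_true] at hck
        rw [if_neg (by simp [hck])]
        by_cases hu : pvIsUsableA k v = true
        · rw [if_neg (by simp [hu])]
          have hkp : (decide (k ∈ pvPriority)) = false := by
            have := hc (k, v) (List.mem_cons_self) hu
            simp only at this
            rw [hck] at this; exact this.symm
          have hitems : (d.insert k v).items = d.items ++ [(k, v)] :=
            PySem.Dict.items_insert_of_not_contains d v hck
          have hsize : (d.insert k v).size = d.size + 1 := by
            unfold PySem.Dict.size
            rw [hitems]; simp
          have hknotin : k ∉ rest.map Prod.fst := (List.nodup_cons.mp hkn).1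
          rw [ih (d.insert k v) hkn.of_cons ?_ ?_]
          · rw [hitems, hsize]
            have h1 : 30 - d.size = (30 - (d.size + 1)) + 1 := by omega
            simp only [List.filter_cons, hu, hkp, Bool.not_false, Bool.and_self, if_pos]
            rw [h1]
            simp [List.take_succ_cons]
          · intro q hq hqu
            rw [PySem.Dict.contains_insert]
            have hne : (q.1 == k) = false := by
              have : q.1 ≠ k := by
                rintro h
                exact hknotin (h ▸ List.mem_map_of_mem hq)
              simp [this]
            rw [hne]
            simpa using hc q (List.mem_cons_of_mem _ hq) hqu
          · rw [PySem.Dict.keys_insert_of_not_contains d v hck]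
            have hk : k ∉ d.keys := by
              intro h
              have ht := (PySem.Dict.contains_iff_mem_keys (d := d) (k := k)).mpr h
              simp [ht] at hck
            simp only [List.nodup_append, hdn, List.nodup_singleton, true_and]
            intro a ha b hb
            rw [List.mem_singleton] at hb
            subst hb
            intro heq
            exact hk (heq ▸ ha)
        · simp only [Bool.not_eq_true] at hu
          rw [if_pos (by simp [hu])]
          rw [ih d hkn.of_cons (fun q hq hqu => hc q (List.mem_cons_of_mem _ hq) hqu) hdn]
          simp [hu]

theorem pv_insertBy_append_all_before {α : Type} (before : α → α → Bool) (x : α)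
    (l1 l2 : List α) (h : ∀ y ∈ l2, before x y = true) :
    PySem.List.insertBy before x (l1 ++ l2) = PySem.List.insertBy before x l1 ++ l2 := by
  induction l1 with
  | nil =>
    cases l2 with
    | nil => rfl
    | cons y t => simp [PySem.List.insertBy, h y (List.mem_cons_self)]
  | cons a l1 ih =>
    by_cases hb : before x a = true
    · simp [PySem.List.insertBy, hb]
    · simp only [Bool.not_eq_true] at hb
      simp [PySem.List.insertBy, hb, ih]

theorem pv_sorted_split_top {α : Type} (xs : List α) (key : α → Int) (M : Int)
    (h : ∀ x ∈ xs, key x ≤ M) :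
    PySem.List.sorted xs key
      = PySem.List.sorted (xs.filter (fun x => decide (key x < M))) key
        ++ xs.filter (fun x => !(decide (key x < M))) := by
  induction xs using List.reverseRecOn with
  | nil => rfl
  | append_singleton xs x ih =>
    have hstep : ∀ (l : List α), PySem.List.sorted (l ++ [x]) key
        = PySem.List.insertBy (fun a b => decide (key a < key b)) x (PySem.List.sorted l key) := by
      intro l
      rw [PySem.List.sorted_eq_foldl_insertBy, PySem.List.sorted_eq_foldl_insertBy, List.foldl_append]
      rfl
    have hxs : ∀ y ∈ xs, key y ≤ M := fun y hy => h y (List.mem_append_left _ hy)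
    have hx : key x ≤ M := h x (by simp)
    rw [hstep, ih hxs]
    by_cases hlt : key x < M
    · rw [pv_insertBy_append_all_before _ _ _ _ ?_]
      · have h1 : (xs ++ [x]).filter (fun x => decide (key x < M)) = xs.filter (fun x => decide (key x < M)) ++ [x] := by
          simp [List.filter_append, hlt]
        have h2 : (xs ++ [x]).filter (fun x => !(decide (key x < M))) = xs.filter (fun x => !(decide (key x < M))) := by
          simp [List.filter_append, hlt]
        rw [h1, h2, hstep]
      · intro y hy
        simp only [List.mem_filter, Bool.not_eq_true', decide_eq_false_iff_not, not_lt] at hy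
        have : key y = M := le_antisymm (hxs y hy.1) hy.2
        simp [this, hlt]
    · have hxM : key x = M := le_antisymm hx (not_lt.mp hlt)
      rw [PySem.List.insertBy_of_forall_not_before _ _ _ ?_]
      · rw [List.filter_append, List.filter_append]
        simp [hlt, List.append_assoc]
      · intro y hy
        rcases List.mem_append.mp hy with hy1 | hy2
        · have : y ∈ xs := by
            have := (PySem.List.mem_sorted _ _ _ _).mp hy1
            exact List.mem_of_mem_filter this
          simp [hxM, not_lt.mpr (hxs y this)]
        · have : y ∈ xs := List.mem_of_mem_filter hy2
          simp [hxM, not_lt.mpr (hxs y this)]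

-- ===== VERDICT (by name: the statement is the Claim_ definition above) =====
theorem format_person_context_py_spec : Claim_equal_format_person_context_py := by
  intro properties _hdom hpre
  unfold Pre_format_person_context_py at hpre
  unfold Spec_format_person_context_py
  set props : PySem.Dict String String := PySem.Dict.mk properties with hpropsdef
  have hpitems : props.items = properties := rfl
  have hpkeys : props.keys.Nodup := hpre
  -- A-side first pass
  set priA : List (String × String) :=
    pvPriority.filterMap (fun k => (pvGsel props k).map (fun v => (k, v))) with hpriAdef
  have hkeysA : priA.map Prod.fst = pvPriority.filter (fun k => (pvGsel props k).isSome) :=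
    pv_keys_filterMap _ _
  have hkeysAnodup : (priA.map Prod.fst).Nodup := by
    rw [hkeysA]
    exact List.Nodup.filter _ (by decide)
  have hnodupA : priA.Nodup := List.Nodup.of_map _ hkeysAnodup
  have hlenA : priA.length ≤ 7 := by
    have := List.length_filterMap_le (fun k => (pvGsel props k).map (fun v => (k, v))) pvPriority
    simpa [pvPriority] using this
  have hmemprops : ∀ k v, props.get? k = some v ↔ (k, v) ∈ properties := by
    intro k v
    rw [PySem.Dict.get?_eq_some_iff_mem_items props k v hpkeys, hpitems]
  have hmemA : ∀ k v, (k, v) ∈ priA ↔ k ∈ pvPriority ∧ (k, v) ∈ properties ∧ pvIsUsableA k v = true := by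
    intro k v
    rw [hpriAdef, List.mem_filterMap]
    constructor
    · rintro ⟨a, ha, hfa⟩
      rcases Option.map_eq_some_iff.mp hfa with ⟨w, hw, hwv⟩
      cases hwv
      unfold pvGsel at hw
      rcases Option.bind_eq_some_iff.mp hw with ⟨u0, hu, hite⟩
      by_cases husable : pvIsUsableA k u0 = true
      · rw [if_pos husable] at hite
        injection hite with h3
        subst h3
        exact ⟨ha, (hmemprops _ _).mp hu, husable⟩
      · rw [if_neg husable] at hite; cases hite
    · rintro ⟨hkP, hmem, husable⟩
      refine ⟨k, hkP, ?_⟩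
      have hget : props.get? k = some v := (hmemprops k v).mpr hmem
      simp [pvGsel, hget, husable]
  -- B-side list
  set u : List (String × String) := properties.filter (fun p => pvIsUsableA p.1 p.2) with hudef
  have hpropsnodup : properties.Nodup := List.Nodup.of_map _ hpre
  have hunodup : u.Nodup := List.Nodup.filter _ hpropsnodup
  set lowP : List (String × String) := u.filter (fun p => decide (p.1 ∈ pvPriority)) with hlowPdef
  set high : List (String × String) := u.filter (fun p => !(decide (p.1 ∈ pvPriority))) with hhighdef
  -- the stable sort splits into the priority block and the rest
  have hsplit : PySem.List.sorted u (fun p => pvRankOf p.1) = PySem.List.sorted lowP (fun p => pvRankOf p.1) ++ high := by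
    have h := pv_sorted_split_top u (fun p => pvRankOf p.1) 7 (fun x _ => pv_rank_le x.1)
    rw [h]
    congr 1
    · congr 1
      apply List.filter_congr
      intro p _
      simp [pv_rank_lt_iff]
    · apply List.filter_congr
      intro p _
      simp [pv_rank_lt_iff]
  -- the sorted priority block is A's first pass
  have hperm : priA.Perm lowP := by
    rw [List.perm_ext_iff_of_nodup hnodupA (List.Nodup.filter _ hunodup)]
    rintro ⟨k, v⟩
    rw [hmemA k v]
    simp only [hudef, List.mem_filter, decide_eq_true_eq]
    tauto
  have hpairwise : priA.Pairwise (fun a b => pvRankOf a.1 < pvRankOf b.1) := by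
    rw [hpriAdef]
    rw [List.pairwise_filterMap]
    have hP : pvPriority.Pairwise (fun a b => pvRankOf a < pvRankOf b) := by decide
    refine hP.imp_of_mem ?_
    intro a b _ _ hab p hp q hq
    rcases Option.map_eq_some_iff.mp hp with ⟨w, _, rfl⟩
    rcases Option.map_eq_some_iff.mp hq with ⟨w', _, rfl⟩
    exact hab
  have hsortedlow : PySem.List.sorted lowP (fun p => pvRankOf p.1) = priA :=
    PySem.List.sorted_eq_of_perm_of_pairwise_lt _ _ _ hperm hpairwise
  -- A's second pass
  have hd0items : (pvPass1 props).items = priA := pv_pass1_items props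
  have hd0size : (pvPass1 props).size = priA.length := by
    unfold PySem.Dict.size; rw [hd0items]
  have hd0keys : (pvPass1 props).keys.Nodup := by
    unfold PySem.Dict.keys; rw [hd0items]; exact hkeysAnodup
  have hd0contains : ∀ p ∈ properties, pvIsUsableA p.1 p.2 = true →
      (pvPass1 props).contains p.1 = decide (p.1 ∈ pvPriority) := by
    rintro ⟨k, v⟩ hmem husable
    have hmemkeys : k ∈ (pvPass1 props).keys ↔ k ∈ pvPriority := by
      unfold PySem.Dict.keys
      rw [hd0items]
      constructor
      · intro hk
        rcases List.mem_map.mp hk with ⟨q, hq, rfl⟩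
        exact ((hmemA q.1 q.2).mp (by simpa using hq)).1
      · intro hk
        have : (k, v) ∈ priA := (hmemA k v).mpr ⟨hk, hmem, husable⟩
        exact List.mem_map_of_mem this
    by_cases hk : k ∈ pvPriority
    · simp only [hk, decide_true]
      exact (PySem.Dict.contains_iff_mem_keys _ _).mpr (hmemkeys.mpr hk)
    · simp only [hk, decide_false]
      by_cases hcont : (pvPass1 props).contains k = true
      · exact absurd (hmemkeys.mp ((PySem.Dict.contains_iff_mem_keys _ _).mp hcont)) hk
      · simpa using hcont
  have hpass2 : (pvPass2 properties (pvPass1 props)).items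
      = priA ++ (properties.filter (fun p => pvIsUsableA p.1 p.2 && !(decide (p.1 ∈ pvPriority)))).take (30 - priA.length) := by
    rw [pv_pass2_items properties (pvPass1 props) hpre hd0contains hd0keys, hd0items, hd0size]
  -- the filtered tail is B's high block
  have hhigh2 : properties.filter (fun p => pvIsUsableA p.1 p.2 && !(decide (p.1 ∈ pvPriority))) = high := by
    rw [hhighdef, hudef, List.filter_filter]
    apply List.filter_congr
    intro p _
    rw [Bool.and_comm]
  -- the two item lists coincide
  have hmain : (pvPass2 properties (pvPass1 props)).items
      = (PySem.List.sorted u (fun p => pvRankOf p.1)).take 30 := by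
    rw [hsplit, hsortedlow, List.take_append, List.take_of_length_le (by omega), hpass2, hhigh2]
  -- assemble
  have haltkey : (fun p : String × String => pvRankDict.getD p.1 (PySem.List.len pvPriority)) = (fun p : String × String => pvRankOf p.1) := rfl
  have hslice : PySem.List.slice (PySem.List.sorted u (fun p => pvRankOf p.1)) none (some 30)
      = (PySem.List.sorted u (fun p => pvRankOf p.1)).take 30 := by
    rw [PySem.List.slice_to _ (by norm_num)]
    rfl
  have haltval : format_person_context_py_alt properties
      = PySem.Str.join "\n" (((PySem.List.sorted u (fun p => pvRankOf p.1)).take 30).map (fun p => "- " ++ p.1 ++ ": " ++ p.2)) := by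
    unfold format_person_context_py_alt
    simp only [haltkey]
    rw [hudef]
    have hfil : properties.filter (fun p => pvIsUsableB p.1 p.2) = properties.filter (fun p => pvIsUsableA p.1 p.2) :=
      List.filter_congr (fun p _ => pv_usableAB p.1 p.2)
    rw [hfil, hslice]
  rw [haltval]
  unfold format_person_context_py
  by_cases hemp : properties = []
  · subst hemp
    rfl
  · rw [if_neg hemp]
    simp only
    by_cases hit : (pvPass2 properties (pvPass1 (PySem.Dict.mk properties))).items = []
    · rw [if_pos hit]
      rw [← hpropsdef] at hit
      rw [hit] at hmain
      rw [← hmain]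
      rfl
    · rw [if_neg hit]
      rw [← hpropsdef]
      rw [hmain]
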